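-- pv_equiv track=rewrite | github.com/nationalarchives/ds-infrastructure-backup-services | applications/shared-src/private_tools/helpers.py | create_upload_map
-- ===== SOURCE A (Python) =====
-- import math
--
-- def create_upload_map(total_size: int):
--     upload_map = []
--     if total_size < 104857601:
--         # up to 100MB - set part size to 5MB
--         block_size = 5242880
--     elif total_size < 1073741825:
--         # up to 1GB - set part size to 100MB
--         block_size = 104857600
--     elif total_size < 53687091201:
--         # up to 50GB - set part size to 200MB
--         block_size = 214748365
--     elif total_size < 107374182401:
--         # up to 100GB - set part size to 410MB
--         block_size =  429496730
--     elif total_size < 1099511627778: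
--         # up to 1TB - set part size to 4GB
--         block_size =  4398046512
--     elif total_size < 2748779069441:
--         # up to 2.5TB - set part size to 10GB
--         block_size = 10995116278
--     else:
--         block_size = 10995116278
--     part_count = math.ceil(-(-total_size / block_size))
--     low_part_count = math.floor(-(-total_size / block_size))
--     last_part_size = total_size - (low_part_count * block_size)
--     if part_count <= 1:
--         upload_map = [[0, (total_size - 1), total_size]]
--     else:
--         transfer_total = 0
--         last_part_no = part_count - 1
--         range_from = 0
--         range_to = 0
--         for i in range(part_count):
--             if i == last_part_no:
--                 transfer_size = last_part_size
--                 range_to = range_from + transfer_size - 1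
--                 transfer_total += transfer_size
--             else:
--                 range_to = range_from + block_size - 1
--                 transfer_total += block_size
--                 transfer_size = block_size
--             upload_map.append([range_from, range_to, transfer_size])
--             range_from = range_to + 1
--     return upload_map
-- ===== SOURCE B (Python) =====
-- def _pick_block(total_size):
--     if total_size < 104857601:
--         return 5242880
--     elif total_size < 1073741825:
--         return 104857600
--     elif total_size < 53687091201:
--         return 214748365
--     elif total_size < 107374182401:
--         return 429496730
--     elif total_size < 1099511627778:
--         return 4398046512
--     elif total_size < 2748779069441:
--         return 10995116278
--     else:
--         return 10995116278
--
--
-- def create_upload_map(total_size: int):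
--     # Greedy single pass: carve parts off the front until nothing remains.
--     block_size = _pick_block(total_size)
--     if total_size <= block_size:
--         return [[0, total_size - 1, total_size]]
--     parts = []
--     start = 0
--     remaining = total_size
--     while remaining > 0:
--         size = min(block_size, remaining)
--         parts.append([start, start + size - 1, size])
--         start += size
--         remaining -= size
--     return parts
-- ===== Notes on version B (the rewrite author's own statement) =====
-- stated objective: alternative
-- what changed: Replaced A's float ceil/floor part-count arithmetic and indexed loop with a single greedy pass that repeatedly carves min(block_size, remaining) off the front until nothing remains, with no part-count computation at all.
-- intended difference: When the chosen block size exactly divides total_size (and total_size exceeds one block), A returns a map whose last part is empty and which leaves the final block uncovered, while B returns full-size parts covering all of total_size, which is the intended upload map. — e.g. on create_upload_map(10485760): A returns [[0, 5242879, 5242880], [5242880, 5242879, 0]], B returns [[0, 5242879, 5242880], [5242880, 10485759, 5242880]]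
import Mathlib
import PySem

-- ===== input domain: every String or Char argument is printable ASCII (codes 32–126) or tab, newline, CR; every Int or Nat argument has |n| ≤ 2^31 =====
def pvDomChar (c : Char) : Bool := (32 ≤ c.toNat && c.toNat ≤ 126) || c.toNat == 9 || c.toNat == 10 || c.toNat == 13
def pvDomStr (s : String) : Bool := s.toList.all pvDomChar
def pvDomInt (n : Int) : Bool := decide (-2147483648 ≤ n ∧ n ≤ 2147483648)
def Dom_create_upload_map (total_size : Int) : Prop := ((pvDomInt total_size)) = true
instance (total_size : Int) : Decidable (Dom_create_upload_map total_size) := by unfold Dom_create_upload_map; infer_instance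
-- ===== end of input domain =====

-- B replaces A's float ceil/floor part-count arithmetic and indexed accumulating loop by a
-- single greedy pass carving min(block_size, remaining) off the front (objective: alternative);
-- where the block size exactly divides total_size, A's zero-size last part is stated as an
-- intended difference (D_ below).

-- ===== PORT A =====
-- loop body of A's 'for i in range(part_count)' (state: upload_map, transfer_total, range_from, range_to)
def cumStepA (block_size last_part_no last_part_size : Int)
    (s : List (List Int) × Int × Int × Int) (i : Int) :
    List (List Int) × Int × Int × Int :=
  let (upload_map, transfer_total, range_from, _range_to) := s
  if i == last_part_no then
    let transfer_size := last_part_size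
    let range_to := range_from + transfer_size - 1
    (upload_map ++ [[range_from, range_to, transfer_size]],
     transfer_total + transfer_size, range_to + 1, range_to)
  else
    let range_to := range_from + block_size - 1
    (upload_map ++ [[range_from, range_to, block_size]],
     transfer_total + block_size, range_to + 1, range_to)

def create_upload_map (total_size : Int) : List (List Int) :=
  let block_size : Int :=
    if total_size < 104857601 then 5242880
    else if total_size < 1073741825 then 104857600
    else if total_size < 53687091201 then 214748365
    else if total_size < 107374182401 then 429496730
    else if total_size < 1099511627778 then 4398046512
    else if total_size < 2748779069441 then 10995116278
    else 10995116278
  -- math.ceil(-(-total_size / block_size)) and math.floor(-(-total_size / block_size)) are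
  -- ported by hand as exact integer ceiling/floor division: exact on Dom, where
  -- |total_size| ≤ 2^31 and block_size ≥ 5242880 keep the float quotient further than half
  -- an ulp from any wrong integer.
  let part_count : Int := -(PySem.Int.floordiv (-total_size) block_size)
  let low_part_count : Int := PySem.Int.floordiv total_size block_size
  let last_part_size : Int := total_size - low_part_count * block_size
  if part_count ≤ 1 then [[0, total_size - 1, total_size]]
  else
    ((PySem.List.pyRange 0 part_count 1).foldl
      (cumStepA block_size (part_count - 1) last_part_size) ([], 0, 0, 0)).1

-- ===== PORT B =====
def pickBlock (total_size : Int) : Int :=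
  if total_size < 104857601 then 5242880
  else if total_size < 1073741825 then 104857600
  else if total_size < 53687091201 then 214748365
  else if total_size < 107374182401 then 429496730
  else if total_size < 1099511627778 then 4398046512
  else if total_size < 2748779069441 then 10995116278
  else 10995116278

-- cited by bLoop's termination argument (the Python while loop terminates because the block is positive)
theorem pickBlock_pos (total_size : Int) : 0 < pickBlock total_size := by
  unfold pickBlock; split_ifs <;> norm_num

-- Source B's 'while remaining > 0' loop; the positivity hypothesis only justifies termination
def bLoop (b : Int) (hb : 0 < b) (start remaining : Int) : List (List Int) :=
  if _h : 0 < remaining then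
    [start, start + min b remaining - 1, min b remaining]
      :: bLoop b hb (start + min b remaining) (remaining - min b remaining)
  else []
termination_by remaining.toNat
decreasing_by omega

def create_upload_map_alt (total_size : Int) : List (List Int) :=
  let block_size := pickBlock total_size
  if total_size ≤ block_size then [[0, total_size - 1, total_size]]
  else bLoop block_size (pickBlock_pos total_size) 0 total_size

-- ===== PRECONDITION & SPEC =====
-- When the chosen block size exactly divides total_size (and total_size exceeds one block),
-- A returns a map whose last part is empty and which leaves the final block uncovered, while B
-- returns full-size parts covering all of total_size, which is the intended upload map.
def D_create_upload_map (total_size : Int) : Prop :=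
  (5242880 < total_size ∧ total_size ≤ 104857600 ∧ (5242880:Int) ∣ total_size)
  ∨ (104857600 < total_size ∧ total_size ≤ 1073741824 ∧ (104857600:Int) ∣ total_size)
  ∨ (1073741824 < total_size ∧ (214748365:Int) ∣ total_size)
instance (total_size : Int) : Decidable (D_create_upload_map total_size) := by
  unfold D_create_upload_map; infer_instance

def Spec_create_upload_map (total_size : Int) (out : List (List Int)) : Prop :=
  ¬ D_create_upload_map total_size → out = create_upload_map_alt total_size
instance (total_size : Int) (out : List (List Int)) : Decidable (Spec_create_upload_map total_size out) := by
  unfold Spec_create_upload_map; infer_instance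

def pvDiffWitness_create_upload_map : Int := 10485760
def pvDiffWitnessOut_create_upload_map : (List (List Int)) × (List (List Int)) :=
  ([[0, 5242879, 5242880], [5242880, 5242879, 0]],
   [[0, 5242879, 5242880], [5242880, 10485759, 5242880]])

-- ===== CLAIM (what is proved, stated in full; the proofs are below) =====
def Claim_unchanged_create_upload_map : Prop := ∀ (total_size : Int), Dom_create_upload_map total_size → Spec_create_upload_map total_size (create_upload_map total_size)
def Claim_changed_create_upload_map : Prop := Dom_create_upload_map (pvDiffWitness_create_upload_map) ∧ D_create_upload_map (pvDiffWitness_create_upload_map) ∧ create_upload_map (pvDiffWitness_create_upload_map) = pvDiffWitnessOut_create_upload_map.1 ∧ create_upload_map_alt (pvDiffWitness_create_upload_map) = pvDiffWitnessOut_create_upload_map.2 ∧ pvDiffWitnessOut_create_upload_map.1 ≠ pvDiffWitnessOut_create_upload_map.2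
def Claim_exact_create_upload_map : Prop := ∀ (total_size : Int), Dom_create_upload_map total_size → D_create_upload_map total_size → create_upload_map total_size ≠ create_upload_map_alt total_size

-- ===== LEMMAS AND PROOFS =====

-- A's loop, started at index a with range_from = a*b, produces the closed-form bulk parts
-- for indices a..last-1 followed by the tail part.
lemma cumLoopA (b last lps : Int) :
    ∀ (k : Nat) (a : Int), a = last - k → 0 ≤ a →
      ∀ (acc : List (List Int)) (tt rt : Int),
        ((PySem.List.pyRange a (last + 1) 1).foldl (cumStepA b last lps) (acc, tt, a * b, rt)).1
        = acc ++ (PySem.List.pyRange a last 1).map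
              (fun i => [i * b, i * b + b - 1, b])
          ++ [[last * b, last * b + lps - 1, lps]] := by
  intro k
  induction k with
  | zero =>
      intro a ha _ acc tt rt
      have ha' : a = last := by omega
      subst ha'
      rw [PySem.List.pyRange_one_singleton, PySem.List.pyRange_one_eq_nil le_rfl]
      simp [cumStepA]
  | succ k ih =>
      intro a ha ha0 acc tt rt
      have hlt : a < last := by omega
      rw [PySem.List.pyRange_one_cons (by omega : a < last + 1),
          PySem.List.pyRange_one_cons hlt]
      have hne : (a == last) = false := by simp; omega
      have hstep : cumStepA b last lps (acc, tt, a * b, rt) a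
          = (acc ++ [[a * b, a * b + b - 1, b]], tt + b, a * b + b - 1 + 1, a * b + b - 1) := by
        simp [cumStepA, hne]
      rw [List.foldl_cons, hstep]
      have hfrom : a * b + b - 1 + 1 = (a + 1) * b := by ring
      rw [hfrom]
      rw [ih (a + 1) (by omega) (by omega)]
      simp

-- A's whole result, as a closed form
lemma parts_eq (t b lps n : Int) :
    (if n ≤ 1 then [[0, t - 1, t]]
     else ((PySem.List.pyRange 0 n 1).foldl (cumStepA b (n - 1) lps) ([], 0, 0, 0)).1)
    = (if n ≤ 1 then [[0, t - 1, t]]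
       else ((PySem.List.pyRange 0 (n - 1) 1).map
              (fun i => [i * b, i * b + b - 1, b]))
            ++ [[(n - 1) * b, (n - 1) * b + lps - 1, lps]]) := by
  by_cases h : n ≤ 1
  · rw [if_pos h, if_pos h]
  · rw [if_neg h, if_neg h]
    have hsplit : n = (n - 1) + 1 := by ring
    rw [hsplit]
    simp only [add_sub_cancel_right]
    have := cumLoopA b (n - 1) lps (n - 1).toNat 0 (by omega) le_rfl [] 0 0
    rw [zero_mul] at this
    rw [this]
    simp

-- B's greedy loop on a remaining size of k full blocks plus a tail 0 < lps ≤ b,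
-- started at position a*b, produces k full parts then the tail part.
lemma bLoop_closed (b : Int) (hb : 0 < b) (lps : Int) (h1 : 0 < lps) (h2 : lps ≤ b) :
    ∀ (k : Nat) (a : Int),
      bLoop b hb (a * b) ((k : Int) * b + lps)
        = (PySem.List.pyRange a (a + (k : Int)) 1).map (fun i => [i * b, i * b + b - 1, b])
          ++ [[(a + (k : Int)) * b, (a + (k : Int)) * b + lps - 1, lps]] := by
  intro k
  induction k with
  | zero =>
      intro a
      rw [bLoop]
      rw [dif_pos (by omega : (0:Int) < ((0:Nat) : Int) * b + lps)]
      have hmin : min b (((0:Nat) : Int) * b + lps) = lps := by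
        simp; omega
      rw [hmin, bLoop]
      rw [dif_neg (by omega : ¬ (0:Int) < ((0:Nat) : Int) * b + lps - lps)]
      rw [PySem.List.pyRange_one_eq_nil (by omega : a + ((0:Nat):Int) ≤ a)]
      simp
  | succ k ih =>
      intro a
      have hkb : (0:Int) ≤ (k : Int) * b := by positivity
      have hrem : ((k + 1 : Nat) : Int) * b + lps = ((k : Int) * b + lps) + b := by
        push_cast; ring
      rw [bLoop]
      rw [dif_pos (by rw [hrem]; omega : (0:Int) < ((k + 1 : Nat) : Int) * b + lps)]
      have hble : b ≤ ((k + 1 : Nat) : Int) * b + lps := by rw [hrem]; omega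
      rw [min_eq_left hble]
      have h2' : ((k + 1 : Nat) : Int) * b + lps - b = ((k : Nat) : Int) * b + lps := by
        push_cast; ring
      rw [h2']
      have ih' := ih (a + 1)
      rw [show (a + 1) * b = a * b + b from by ring] at ih'
      rw [ih']
      rw [PySem.List.pyRange_one_cons
        (show a < a + ((k + 1 : Nat) : Int) by push_cast; omega)]
      have h3' : a + 1 + ((k : Nat) : Int) = a + ((k + 1 : Nat) : Int) := by push_cast; ring
      rw [h3']
      simp

-- the arithmetic core: with block b > 0 and t not an exact proper multiple of b,
-- A's body (for this b) equals B's body (for this b)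
lemma branch_eq (t b : Int) (hb : 0 < b) (hnd : ¬ (b < t ∧ b ∣ t)) :
    (if -(PySem.Int.floordiv (-t) b) ≤ 1 then [[0, t - 1, t]]
     else ((PySem.List.pyRange 0 (-(PySem.Int.floordiv (-t) b)) 1).foldl
        (cumStepA b (-(PySem.Int.floordiv (-t) b) - 1)
          (t - PySem.Int.floordiv t b * b)) ([], 0, 0, 0)).1)
    = (if t ≤ b then [[0, t - 1, t]] else bLoop b hb 0 t) := by
  rw [parts_eq t b (t - PySem.Int.floordiv t b * b) (-(PySem.Int.floordiv (-t) b))]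
  have hceil : (-(PySem.Int.floordiv (-t) b) ≤ 1) ↔ t ≤ b := by
    have hiff := PySem.Int.le_floordiv_iff_mul_le (a := -t) (b := b) (q := -1) hb
    constructor
    · intro h
      have h1 : -1 ≤ PySem.Int.floordiv (-t) b := by omega
      have := hiff.mp h1
      nlinarith
    · intro h
      have := hiff.mpr (by nlinarith)
      omega
  by_cases hle : t ≤ b
  · rw [if_pos (hceil.mpr hle), if_pos hle]
  · rw [if_neg (fun h => hle (hceil.mp h)), if_neg hle]
    -- t > b and (by hnd) b does not divide t
    have hbt : b < t := by omega
    have hnd' : ¬ b ∣ t := fun hd => hnd ⟨hbt, hd⟩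
    have hqe : PySem.Int.floordiv t b = t / b := PySem.Int.floordiv_eq_ediv_of_pos hb
    have hmod : t - PySem.Int.floordiv t b * b = t % b := by
      rw [hqe, Int.emod_def]; ring
    have hmodpos : 0 < t % b := by
      have h0 : 0 ≤ t % b := Int.emod_nonneg t (by omega)
      have : t % b ≠ 0 := fun h => hnd' (Int.dvd_of_emod_eq_zero h)
      omega
    have hmodlt : t % b < b := Int.emod_lt_of_pos t hb
    have hdecomp : t = t / b * b + t % b := by
      rw [Int.emod_def]; ring
    have hqpos : 0 < t / b := by
      by_contra h
      have : t / b ≤ 0 := by omega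
      nlinarith
    have hn : -(PySem.Int.floordiv (-t) b) = t / b + 1 := by
      have : PySem.Int.floordiv (-t) b = -(t / b + 1) := by
        rw [PySem.Int.floordiv_eq_iff_of_pos hb]
        constructor <;> nlinarith
      omega
    rw [hn, hmod]
    simp only [add_sub_cancel_right]
    have hk : (((t / b).toNat : Int)) = t / b := Int.toNat_of_nonneg (by omega)
    have hcl := bLoop_closed b hb (t % b) hmodpos (by omega) (t / b).toNat 0
    rw [hk, zero_mul, zero_add, ← hdecomp] at hcl
    rw [hcl]
    have hlast : t / b * b + t % b - 1 = t - 1 := by conv_rhs => rw [hdecomp]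
    rw [hlast]

-- the divisible case: A's closed form ends with a zero-size part, B's with a full block
lemma branch_ne (t b : Int) (hb : 0 < b) (hbt : b < t) (hdvd : b ∣ t) :
    (if -(PySem.Int.floordiv (-t) b) ≤ 1 then [[0, t - 1, t]]
     else ((PySem.List.pyRange 0 (-(PySem.Int.floordiv (-t) b)) 1).foldl
        (cumStepA b (-(PySem.Int.floordiv (-t) b) - 1)
          (t - PySem.Int.floordiv t b * b)) ([], 0, 0, 0)).1)
    ≠ (if t ≤ b then [[0, t - 1, t]] else bLoop b hb 0 t) := by
  obtain ⟨q, hq⟩ := hdvd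
  have hq2 : 2 ≤ q := by nlinarith
  have hdiv : t / b = q := by rw [hq, Int.mul_ediv_cancel_left _ (by omega)]
  have hfd : PySem.Int.floordiv t b = q := by
    rw [PySem.Int.floordiv_eq_ediv_of_pos hb, hdiv]
  have hnegfd : PySem.Int.floordiv (-t) b = -q := by
    rw [PySem.Int.floordiv_eq_iff_of_pos hb]
    constructor <;> nlinarith
  have hlps : t - PySem.Int.floordiv t b * b = 0 := by rw [hfd, hq]; ring
  rw [parts_eq t b _ _, hnegfd, hlps]
  rw [if_neg (by omega : ¬ -(-q) ≤ 1), if_neg (by nlinarith : ¬ t ≤ b)]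
  -- B's value via the closed form with k = q - 1 full blocks and tail b
  have hk : (((q - 1).toNat : Int)) = q - 1 := Int.toNat_of_nonneg (by omega)
  have hcl := bLoop_closed b hb b hb le_rfl (q - 1).toNat 0
  rw [hk, zero_mul, zero_add] at hcl
  have ht' : (q - 1) * b + b = t := by rw [hq]; ring
  rw [ht'] at hcl
  rw [hcl]
  intro hEq
  have hpref : PySem.List.pyRange 0 (- -q - 1) 1 = PySem.List.pyRange 0 (q - 1) 1 := by
    norm_num
  rw [hpref] at hEq
  have htail := List.append_cancel_left hEq
  simp at htail
  omega

-- D_ restated (within Dom's |total_size| ≤ 2^31 bound) as A's and B's block selection: the block chosen for total_size is a proper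
-- divisor of it
lemma D_iff (t : Int) (hdom : t ≤ 2147483648) :
    D_create_upload_map t ↔
      ((if t < 104857601 then (5242880:Int)
        else if t < 1073741825 then 104857600
        else if t < 53687091201 then 214748365
        else if t < 107374182401 then 429496730
        else if t < 1099511627778 then 4398046512
        else if t < 2748779069441 then 10995116278
        else 10995116278) < t
       ∧ (if t < 104857601 then (5242880:Int)
          else if t < 1073741825 then 104857600
          else if t < 53687091201 then 214748365
          else if t < 107374182401 then 429496730
          else if t < 1099511627778 then 4398046512
          else if t < 2748779069441 then 10995116278
          else 10995116278) ∣ t) := by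
  unfold D_create_upload_map
  split_ifs <;> omega

-- ===== VERDICT (by name: the statements are the Claim_ definitions above) =====
theorem create_upload_map_spec : Claim_unchanged_create_upload_map := by
  intro t hdom hnd
  have hdb : t ≤ 2147483648 := by
    have := hdom; simp [Dom_create_upload_map, pvDomInt] at this; omega
  rw [D_iff t hdb] at hnd
  simp only [create_upload_map, create_upload_map_alt, pickBlock]
  exact branch_eq t _ (by split_ifs <;> norm_num) hnd

theorem create_upload_map_changed : Claim_changed_create_upload_map := by
  unfold Claim_changed_create_upload_map
  refine ⟨by decide, by decide, by decide, ?_, by decide⟩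
  show create_upload_map_alt 10485760 = pvDiffWitnessOut_create_upload_map.2
  have hcl := bLoop_closed 5242880 (pickBlock_pos 10485760) 5242880 (by norm_num)
      le_rfl 1 0
  norm_num at hcl
  simp only [create_upload_map_alt, pickBlock]
  norm_num
  rw [hcl]
  decide

theorem create_upload_map_tight : Claim_exact_create_upload_map := by
  intro t hdom hd
  have hdb : t ≤ 2147483648 := by
    have := hdom; simp [Dom_create_upload_map, pvDomInt] at this; omega
  rw [D_iff t hdb] at hd
  obtain ⟨hbt, hdvd⟩ := hd
  simp only [create_upload_map, create_upload_map_alt, pickBlock]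
  exact branch_ne t _ (by split_ifs <;> norm_num) hbt hdvd
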